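-- pv_equiv track=rewrite | github.com/HsipingLi/ChiGAD | models/gnn.py | get_coeffs
-- ===== SOURCE A (Python) =====
-- def get_coeffs(coeff_mat):
--     from collections import defaultdict
--     for i in range(len(coeff_mat)-1):
--         if i==0:
--             poly1 = coeff_mat[0]
--         else:
--             poly1 = ls_d
--         poly2 = coeff_mat[i+1]
--
--         poly1_dict = defaultdict(int)
--         poly2_dict = defaultdict(int)
--         for term in poly1:
--             poly1_dict[term] = 1
--         for term in poly2:
--             poly2_dict[term] = 1
--
--         degrees = set()
--         for degree1 in poly1_dict:
--             for degree2 in poly2_dict: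
--                 degrees.add(degree1 + degree2)
--
--         ls_d = sorted(list(degrees))
--
--     return ls_d
-- ===== SOURCE B (Python) =====
-- def _merge(xs, ys):
--     # merge two strictly increasing lists into one strictly increasing list (dedup on ties)
--     i = j = 0
--     out = []
--     while i < len(xs) and j < len(ys):
--         a, b = xs[i], ys[j]
--         if a < b:
--             out.append(a); i += 1
--         elif b < a:
--             out.append(b); j += 1
--         else:
--             out.append(a); i += 1; j += 1
--     out.extend(xs[i:])
--     out.extend(ys[j:])
--     return out
--
--
-- def get_coeffs(coeff_mat):
--     # Keep the running degree set as a strictly increasing list; each row's sumset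
--     # is formed by merging arithmetic-shifted copies of it (no hashing, no sorting).
--     acc = [0]
--     for row in coeff_mat:
--         step = []
--         for s in row:
--             step = _merge(step, [a + s for a in acc])
--         acc = step
--     return acc
-- ===== Notes on version B (the rewrite author's own statement) =====
-- stated objective: alternative
-- what changed: B maintains the degree set as a strictly increasing list and forms each sumset by two-way merging arithmetic-shifted copies of it (duplicates collapse in the merge), replacing A's hash-dict/set of all pairwise sums plus a per-step sort.
import Mathlib
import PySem

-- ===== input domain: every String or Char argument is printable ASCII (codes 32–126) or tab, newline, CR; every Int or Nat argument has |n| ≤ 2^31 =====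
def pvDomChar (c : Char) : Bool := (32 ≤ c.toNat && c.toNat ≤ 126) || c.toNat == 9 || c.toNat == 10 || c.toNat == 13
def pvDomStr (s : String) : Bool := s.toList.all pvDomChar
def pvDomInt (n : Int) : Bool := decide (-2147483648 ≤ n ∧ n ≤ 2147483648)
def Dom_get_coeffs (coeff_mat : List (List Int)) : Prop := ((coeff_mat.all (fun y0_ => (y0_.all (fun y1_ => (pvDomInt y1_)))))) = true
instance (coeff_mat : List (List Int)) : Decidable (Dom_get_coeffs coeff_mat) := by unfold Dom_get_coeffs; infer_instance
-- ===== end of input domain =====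

-- B keeps the running degree set as a strictly increasing list and forms each row's sumset by
-- two-way merges of arithmetic-shifted copies of it (duplicates collapse inside the merge),
-- instead of A's per-step hash dicts of all pairwise sums plus a re-sort; objective: alternative.

-- ===== PORT A =====
-- one iteration of A's loop body (i is the Python loop index; ls_d the running sorted list)
def pvAStep (coeff_mat : List (List Int)) (ls_d : List Int) (i : Int) : List Int :=
  let poly1 : List Int := if i == 0 then PySem.List.pyGetD coeff_mat 0 [] else ls_d
  let poly2 : List Int := PySem.List.pyGetD coeff_mat (i + 1) []
  let poly1_dict : PySem.Dict Int Int := poly1.foldl (fun d term => d.insert term 1) PySem.Dict.empty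
  let poly2_dict : PySem.Dict Int Int := poly2.foldl (fun d term => d.insert term 1) PySem.Dict.empty
  let degrees : PySem.Set Int :=
    poly1_dict.keys.foldl (fun s degree1 =>
      poly2_dict.keys.foldl (fun s degree2 => PySem.Set.add s (degree1 + degree2)) s) PySem.Set.empty
  PySem.List.sorted degrees (fun x => x)

-- ls_d starts unassigned in Python ([] here); Pre_ guarantees the loop assigns it before the return reads it
def get_coeffs (coeff_mat : List (List Int)) : List Int :=
  (PySem.List.pyRange 0 ((coeff_mat.length : Int) - 1)).foldl (pvAStep coeff_mat) []

-- ===== PORT B =====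
-- _merge: merge two strictly increasing lists into one strictly increasing list (dedup on ties)
def pvMerge : List Int → List Int → List Int
  | [], ys => ys
  | x :: xs, [] => x :: xs
  | x :: xs, y :: ys =>
    if x < y then x :: pvMerge xs (y :: ys)
    else if y < x then y :: pvMerge (x :: xs) ys
    else x :: pvMerge xs ys
termination_by xs ys => xs.length + ys.length

-- B's inner loop over one row: step = _merge(step, [a + s for a in acc])
def pvRowStep (acc row : List Int) : List Int :=
  row.foldl (fun step s => pvMerge step (acc.map (fun a => a + s))) []

def get_coeffs_alt (coeff_mat : List (List Int)) : List Int :=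
  coeff_mat.foldl pvRowStep [0]

-- ===== PRECONDITION & SPEC =====
-- Pre_ excludes matrices with fewer than two rows: there A's loop never assigns ls_d and the
-- return raises NameError (no value); everywhere else A returns normally.
def Pre_get_coeffs (coeff_mat : List (List Int)) : Prop := 2 ≤ coeff_mat.length
instance (coeff_mat : List (List Int)) : Decidable (Pre_get_coeffs coeff_mat) := by unfold Pre_get_coeffs; infer_instance
def pvWitness_get_coeffs : List (List Int) := [[1, 2], [0, 3]]

def Spec_get_coeffs (coeff_mat : List (List Int)) (out : List Int) : Prop := out = get_coeffs_alt coeff_mat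
instance (coeff_mat : List (List Int)) (out : List Int) : Decidable (Spec_get_coeffs coeff_mat out) := by unfold Spec_get_coeffs; infer_instance

-- ===== CLAIM (what is proved, stated in full; the proofs are below) =====
def Claim_equal_get_coeffs : Prop := ∀ (coeff_mat : List (List Int)), Dom_get_coeffs coeff_mat → Pre_get_coeffs coeff_mat → Spec_get_coeffs coeff_mat (get_coeffs coeff_mat)

-- ===== LEMMAS AND PROOFS =====

-- ---- A-side membership / shape lemmas ----

-- membership in the inner add-loop
lemma pv_mem_inner (t : List Int) (a : Int) (acc : List Int) (x : Int) :
    x ∈ t.foldl (fun s b => PySem.Set.add s (a + b)) acc ↔ x ∈ acc ∨ ∃ b ∈ t, x = a + b := by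
  induction t generalizing acc with
  | nil => simp
  | cons c t ih =>
      simp only [List.foldl_cons, ih, PySem.Set.mem_add, List.mem_cons]
      constructor
      · rintro (⟨h | h⟩ | ⟨b, hb, rfl⟩)
        · exact Or.inl h
        · exact Or.inr ⟨c, Or.inl rfl, h⟩
        · exact Or.inr ⟨b, Or.inr hb, rfl⟩
      · rintro (h | ⟨b, (rfl | hb), rfl⟩)
        · exact Or.inl (Or.inl h)
        · exact Or.inl (Or.inr rfl)
        · exact Or.inr ⟨b, hb, rfl⟩

-- membership in the double sum-loop
lemma pv_mem_double (s t : List Int) (init : List Int) (x : Int) :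
    x ∈ s.foldl (fun acc a => t.foldl (fun acc b => PySem.Set.add acc (a + b)) acc) init ↔
      x ∈ init ∨ ∃ a ∈ s, ∃ b ∈ t, x = a + b := by
  induction s generalizing init with
  | nil => simp
  | cons c s ih =>
      simp only [List.foldl_cons, ih, pv_mem_inner, List.mem_cons]
      constructor
      · rintro (⟨h | ⟨b, hb, rfl⟩⟩ | ⟨a, ha, hb⟩)
        · exact Or.inl h
        · exact Or.inr ⟨c, Or.inl rfl, b, hb, rfl⟩
        · exact Or.inr ⟨a, Or.inr ha, hb⟩
      · rintro (h | ⟨a, (rfl | ha), hb⟩)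
        · exact Or.inl (Or.inl h)
        · exact Or.inl (Or.inr hb)
        · exact Or.inr ⟨a, ha, hb⟩

-- the double sum-loop keeps the set duplicate-free
lemma pv_nodup_double (s t : List Int) (init : List Int) (h : init.Nodup) :
    (s.foldl (fun acc a => t.foldl (fun acc b => PySem.Set.add acc (a + b)) acc) init).Nodup := by
  induction s generalizing init with
  | nil => exact h
  | cons c s ih =>
      refine ih _ ?_
      clear ih
      induction t generalizing init with
      | nil => exact h
      | cons d t iht => exact iht _ (PySem.Set.nodup_add _ _ h)

-- sorted of a duplicate-free list is duplicate-free and strictly increasing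
lemma pv_sorted_set_props (s : List Int) (h : s.Nodup) :
    (PySem.List.sorted s (fun x => x)).Nodup ∧
      (PySem.List.sorted s (fun x => x)).Pairwise (· < ·) := by
  have hperm := PySem.List.sorted_perm s (fun x => x) false
  have hnd : (PySem.List.sorted s (fun x => x)).Nodup := hperm.nodup_iff.mpr h
  refine ⟨hnd, ?_⟩
  have hle := PySem.List.sorted_pairwise s (fun x => x)
  have hne : (PySem.List.sorted s (fun x => x)).Pairwise (· ≠ ·) := hnd
  exact (hle.and hne).imp (fun h => lt_of_le_of_ne h.1 h.2)

lemma pv_mem_pvAStep (cm : List (List Int)) (l : List Int) (i : Int) (x : Int) :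
    x ∈ pvAStep cm l i ↔
      ∃ a ∈ (if i == 0 then PySem.List.pyGetD cm 0 [] else l),
        ∃ b ∈ PySem.List.pyGetD cm (i + 1) [], x = a + b := by
  unfold pvAStep
  rw [PySem.List.mem_sorted,
      PySem.Dict.keys_foldl_insert _ (fun _ _ => (1 : Int)),
      PySem.Dict.keys_foldl_insert _ (fun _ _ => (1 : Int)),
      pv_mem_double]
  simp [PySem.Set.mem_update, PySem.Dict.empty]

lemma pv_pvAStep_props (cm : List (List Int)) (l : List Int) (i : Int) :
    (pvAStep cm l i).Nodup ∧ (pvAStep cm l i).Pairwise (· < ·) := by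
  unfold pvAStep
  exact pv_sorted_set_props _ (pv_nodup_double _ _ _ List.nodup_nil)

-- ---- B-side merge lemmas ----

lemma pv_mem_pvMerge (xs ys : List Int) (x : Int) :
    x ∈ pvMerge xs ys ↔ x ∈ xs ∨ x ∈ ys := by
  fun_induction pvMerge xs ys with
  | case1 ys => simp
  | case2 x xs => simp
  | case3 a xs b ys h ih => simp [ih]; tauto
  | case4 a xs b ys h1 h2 ih => simp [ih]; tauto
  | case5 a xs b ys h1 h2 ih =>
      have hab : a = b := le_antisymm (not_lt.mp h2) (not_lt.mp h1)
      simp [ih, hab]; tauto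

lemma pv_pairwise_pvMerge (xs ys : List Int)
    (hx : xs.Pairwise (· < ·)) (hy : ys.Pairwise (· < ·)) :
    (pvMerge xs ys).Pairwise (· < ·) := by
  fun_induction pvMerge xs ys with
  | case1 ys => exact hy
  | case2 x xs => exact hx
  | case3 a xs b ys h ih =>
      rw [List.pairwise_cons] at hx hy ⊢
      refine ⟨?_, ih hx.2 (List.pairwise_cons.mpr hy)⟩
      intro z hz
      rcases (pv_mem_pvMerge xs (b :: ys) z).mp hz with hz | hz
      · exact hx.1 z hz
      · rcases List.mem_cons.mp hz with rfl | hz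
        · exact h
        · exact lt_trans h (hy.1 z hz)
  | case4 a xs b ys h1 h2 ih =>
      rw [List.pairwise_cons] at hx hy ⊢
      refine ⟨?_, ih (List.pairwise_cons.mpr hx) hy.2⟩
      intro z hz
      rcases (pv_mem_pvMerge (a :: xs) ys z).mp hz with hz | hz
      · rcases List.mem_cons.mp hz with rfl | hz
        · exact h2
        · exact lt_trans h2 (hx.1 z hz)
      · exact hy.1 z hz
  | case5 a xs b ys h1 h2 ih =>
      have hab : a = b := le_antisymm (not_lt.mp h2) (not_lt.mp h1)
      rw [List.pairwise_cons] at hx hy ⊢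
      refine ⟨?_, ih hx.2 hy.2⟩
      intro z hz
      rcases (pv_mem_pvMerge xs ys z).mp hz with hz | hz
      · exact hx.1 z hz
      · exact hab ▸ hy.1 z hz

-- membership in B's inner row fold
lemma pv_mem_rowfold (acc row init : List Int) (x : Int) :
    x ∈ row.foldl (fun step s => pvMerge step (acc.map (fun a => a + s))) init ↔
      x ∈ init ∨ ∃ a ∈ acc, ∃ s ∈ row, x = a + s := by
  induction row generalizing init with
  | nil => simp
  | cons c row ih =>
      simp only [List.foldl_cons, ih, pv_mem_pvMerge, List.mem_map, List.mem_cons]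
      constructor
      · rintro (⟨h | ⟨a, ha, rfl⟩⟩ | ⟨a, ha, s, hs, rfl⟩)
        · exact Or.inl h
        · exact Or.inr ⟨a, ha, c, Or.inl rfl, rfl⟩
        · exact Or.inr ⟨a, ha, s, Or.inr hs, rfl⟩
      · rintro (h | ⟨a, ha, s, (rfl | hs), rfl⟩)
        · exact Or.inl (Or.inl h)
        · exact Or.inl (Or.inr ⟨a, ha, rfl⟩)
        · exact Or.inr ⟨a, ha, s, hs, rfl⟩

lemma pv_mem_pvRowStep (acc row : List Int) (x : Int) :
    x ∈ pvRowStep acc row ↔ ∃ a ∈ acc, ∃ s ∈ row, x = a + s := by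
  unfold pvRowStep
  rw [pv_mem_rowfold]
  simp

lemma pv_pairwise_pvRowStep (acc row : List Int) (h : acc.Pairwise (· < ·)) :
    (pvRowStep acc row).Pairwise (· < ·) := by
  unfold pvRowStep
  have : ∀ (init : List Int), init.Pairwise (· < ·) →
      (row.foldl (fun step s => pvMerge step (acc.map (fun a => a + s))) init).Pairwise (· < ·) := by
    induction row with
    | nil => intro init hi; exact hi
    | cons c row ih =>
        intro init hi
        refine ih _ (pv_pairwise_pvMerge _ _ hi ?_)
        exact List.pairwise_map.mpr (h.imp (fun hab => by omega))
  exact this [] List.Pairwise.nil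

-- B's whole fold is strictly increasing
lemma pv_pairwise_altfold (rows : List (List Int)) (init : List Int)
    (h : init.Pairwise (· < ·)) :
    (rows.foldl pvRowStep init).Pairwise (· < ·) := by
  induction rows generalizing init with
  | nil => exact h
  | cons r rows ih => exact ih _ (pv_pairwise_pvRowStep _ _ h)

-- two strictly increasing lists with the same members are equal
lemma pv_eq_of_sorted_mem (l1 l2 : List Int)
    (h1 : l1.Pairwise (· < ·)) (h2 : l2.Pairwise (· < ·))
    (hm : ∀ x, x ∈ l1 ↔ x ∈ l2) : l1 = l2 := by
  have nd1 : l1.Nodup := h1.imp ne_of_lt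
  have nd2 : l2.Nodup := h2.imp ne_of_lt
  exact List.Perm.eq_of_pairwise (fun a b _ _ hab hba => absurd hba (not_lt.mpr hab.le))
    h1 h2 ((List.perm_ext_iff_of_nodup nd1 nd2).mpr hm)

-- invariant: after m loop iterations A's list and B's fold over the first m+1 rows hold the same
-- degrees, and A's list is a pvAStep result (hence sorted and duplicate-free)
lemma pv_inv (cm : List (List Int)) :
    ∀ (m : Nat), 1 ≤ m → m < cm.length →
      (∀ x : Int, (x ∈ (PySem.List.pyRange 0 (m : Int)).foldl (pvAStep cm) [] ↔
          x ∈ (cm.take (m + 1)).foldl pvRowStep [0])) ∧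
      ∃ l i, (PySem.List.pyRange 0 (m : Int)).foldl (pvAStep cm) [] = pvAStep cm l i := by
  intro m
  induction m with
  | zero => omega
  | succ n ih =>
      intro _ hlt
      have hrange : PySem.List.pyRange 0 ((n + 1 : Nat) : Int) =
          PySem.List.pyRange 0 (n : Int) ++ [(n : Int)] := by
        push_cast
        exact PySem.List.pyRange_one_succ_right (by positivity)
      have htake : ∀ (k : Nat) (hk : k < cm.length), cm.take (k + 1) = cm.take k ++ [cm[k]] := by
        intro k hk
        rw [List.take_add_one, List.getElem?_eq_getElem hk]
        rfl
      rw [hrange, List.foldl_append]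
      rcases Nat.eq_zero_or_pos n with hn0 | hn1
      · -- base case: n = 0, the first iteration
        subst hn0
        have h1 : 1 < cm.length := hlt
        have h0 : 0 < cm.length := by omega
        have h00 : List.foldl (pvAStep cm) [] (PySem.List.pyRange 0 ((0 : Nat) : Int)) = [] := by
          norm_num [PySem.List.pyRange]
        constructor
        · intro x
          rw [h00, htake 1 h1, htake 0 h0]
          simp only [List.take_zero, List.nil_append, List.foldl_append, List.foldl_cons,
            List.foldl_nil, Nat.cast_zero]
          rw [pv_mem_pvAStep]
          simp only [pv_mem_pvRowStep]
          have hg0 : PySem.List.pyGetD cm 0 [] = cm[0] := by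
            have := PySem.List.pyGetD_eq_getElem cm ([] : List Int) (i := 0) (by norm_num)
              (by exact_mod_cast h0)
            simpa using this
          have hg1 : PySem.List.pyGetD cm (0 + 1) [] = cm[1] := by
            have := PySem.List.pyGetD_eq_getElem cm ([] : List Int) (i := 1) (by norm_num)
              (by exact_mod_cast h1)
            simpa using this
          rw [hg1]
          simp only [hg0]
          constructor
          · rintro ⟨a, ha, b, hb, rfl⟩
            exact ⟨0 + a, ⟨0, by simp, a, ha, rfl⟩, b, hb, by ring⟩
          · rintro ⟨a, ⟨z, hz, a', ha', rfl⟩, b, hb, rfl⟩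
            have : z = 0 := by simpa using hz
            subst this
            exact ⟨a', ha', b, hb, by ring⟩
        · exact ⟨[], 0, by rw [h00]; simp⟩
      · -- inductive step: n ≥ 1
        obtain ⟨hmem, l, i, hstate⟩ := ih hn1 (by omega)
        have hne : ¬ (((n : Int) == 0) = true) := by
          simp only [beq_iff_eq]
          exact_mod_cast Nat.pos_iff_ne_zero.mp hn1
        constructor
        · intro x
          rw [htake (n + 1) hlt, List.foldl_append]
          simp only [List.foldl_cons, List.foldl_nil]
          rw [pv_mem_pvAStep, pv_mem_pvRowStep, if_neg hne]
          have hg : PySem.List.pyGetD cm ((n : Int) + 1) [] = cm[n + 1] := by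
            have := PySem.List.pyGetD_eq_getElem cm ([] : List Int) (i := (n : Int) + 1)
              (by positivity) (by exact_mod_cast hlt)
            simpa using this
          rw [hg]
          constructor
          · rintro ⟨a, ha, b, hb, rfl⟩
            exact ⟨a, (hmem a).mp ha, b, hb, rfl⟩
          · rintro ⟨a, ha, b, hb, rfl⟩
            exact ⟨a, (hmem a).mpr ha, b, hb, rfl⟩
        · exact ⟨_, _, rfl⟩

-- ===== VERDICT (by name: the statements are the Claim_ definitions above) =====
theorem get_coeffs_spec : Claim_equal_get_coeffs := by
  intro cm _ hpre
  unfold Pre_get_coeffs at hpre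
  unfold Spec_get_coeffs get_coeffs get_coeffs_alt
  have hm1 : 1 ≤ cm.length - 1 := by omega
  have hmlt : cm.length - 1 < cm.length := by omega
  obtain ⟨hmem, l, i, hstate⟩ := pv_inv cm (cm.length - 1) hm1 hmlt
  have hcast : ((cm.length : Int) - 1) = ((cm.length - 1 : Nat) : Int) := by
    have : (1 : Nat) ≤ cm.length := by omega
    push_cast [Nat.cast_sub this]
    ring
  rw [hcast]
  have htake : cm.take (cm.length - 1 + 1) = cm := by
    have : cm.length - 1 + 1 = cm.length := by omega
    rw [this, List.take_length]
  rw [htake] at hmem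
  have hpropsA := pv_pvAStep_props cm l i
  rw [← hstate] at hpropsA
  have hpropsB : (cm.foldl pvRowStep [0]).Pairwise (· < ·) :=
    pv_pairwise_altfold cm [0] (List.pairwise_singleton _ _)
  exact pv_eq_of_sorted_mem _ _ hpropsA.2 hpropsB hmem
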